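-- pv_equiv track=rewrite | github.com/alexandraback/datacollection | solutions_5631989306621952_1/Python/killerrex/problem_a.py | winner
-- ===== SOURCE A (Python) =====
-- def winner(txt):
--     """
--     Reorder to obtain the last...
--     """
--     sol = txt[0]
--     for c in txt[1:]:
--         if c >= sol[0]:
--             sol = c + sol
--         else:
--             sol += c
--     return sol
-- ===== SOURCE B (Python) =====
-- def winner(txt):
--     # Staged: (1) prefix-maxima array, (2) partition into record/non-record chars,
--     # (3) records (a nondecreasing sequence) sorted descending, then the rest in order.
--     maxima = []
--     pm = txt[0]
--     for c in txt:
--         if c > pm: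
--             pm = c
--         maxima.append(pm)
--     records = [c for c, m in zip(txt, maxima) if c == m]
--     others = [c for c, m in zip(txt, maxima) if c != m]
--     return ''.join(sorted(records, reverse=True)) + ''.join(others)
-- ===== Notes on version B (the rewrite author's own statement) =====
-- stated objective: faster
-- what changed: A rebuilds the result string by prepending/appending one char at a time (quadratic copying); B is staged: it builds the prefix-maxima array, partitions the characters into records (char equal to its prefix maximum) and non-records by zipping, and emits the records sorted descending followed by the non-records in order.
import Mathlib
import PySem

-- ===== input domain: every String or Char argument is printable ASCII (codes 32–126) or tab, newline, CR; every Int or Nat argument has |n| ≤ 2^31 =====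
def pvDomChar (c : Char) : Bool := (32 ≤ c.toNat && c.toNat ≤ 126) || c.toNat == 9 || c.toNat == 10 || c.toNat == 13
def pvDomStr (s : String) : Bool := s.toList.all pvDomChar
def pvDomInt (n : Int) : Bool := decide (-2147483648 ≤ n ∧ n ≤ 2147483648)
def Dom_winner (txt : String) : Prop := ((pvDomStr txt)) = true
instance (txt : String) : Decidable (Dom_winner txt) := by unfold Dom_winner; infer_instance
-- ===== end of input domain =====

-- B replaces A's per-step string prepend/append (quadratic copying) with three staged
-- passes: prefix-maxima array, partition into record/non-record chars, records sorted
-- descending followed by the rest (objective: faster).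

-- ===== PORT A =====
-- sol is the string built so far; each step prepends or appends one char.
def winner (txt : String) : String :=
  match txt.toList with
  | [] => ""  -- unreachable under Pre_winner (Python raises IndexError on txt[0])
  | t :: rest =>
    String.ofList (rest.foldl
      (fun sol c => if sol.headD ' ' ≤ c then c :: sol else sol ++ [c]) [t])

-- ===== PORT B =====
-- staged: maxima list via fold, zip+filter partitions, records sorted descending.
def winner_alt (txt : String) : String :=
  match txt.toList with
  | [] => ""  -- unreachable under Pre_winner (Python raises IndexError on txt[0])
  | t :: _ =>
    let cs := txt.toList
    let st := cs.foldl
      (fun (st : List Char × Char) c =>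
        let pm := if st.2 < c then c else st.2
        (st.1 ++ [pm], pm)) ([], t)
    let pairs := cs.zip st.1
    let records := (pairs.filter (fun p => p.1 == p.2)).map Prod.fst
    let others := (pairs.filter (fun p => !(p.1 == p.2))).map Prod.fst
    String.ofList (PySem.List.sorted records (fun x => x) true ++ others)

-- ===== PRECONDITION & SPEC =====
-- Pre_ excludes only the empty string, on which both A and B raise IndexError.
def Pre_winner (txt : String) : Prop := txt ≠ ""
instance (txt : String) : Decidable (Pre_winner txt) := by unfold Pre_winner; infer_instance
def pvWitness_winner : String := "ba"
def Spec_winner (txt : String) (out : String) : Prop := out = winner_alt txt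
instance (txt : String) (out : String) : Decidable (Spec_winner txt out) := by unfold Spec_winner; infer_instance

-- ===== CLAIM (what is proved, stated in full; the proofs are below) =====
def Claim_equal_winner : Prop := ∀ (txt : String), Dom_winner txt → Pre_winner txt → Spec_winner txt (winner txt)

-- ===== LEMMAS AND PROOFS =====

-- The record characters (each ≥ the running maximum when seen) and the others,
-- as simple recursive functions; both ports are reduced to these.
def pvRecs : List Char → Char → List Char
  | [], _ => []
  | c :: cs, pm => if pm ≤ c then c :: pvRecs cs c else pvRecs cs pm

def pvOthers : List Char → Char → List Char
  | [], _ => []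
  | c :: cs, pm => if pm ≤ c then pvOthers cs c else c :: pvOthers cs pm

def pvMaxima : List Char → Char → List Char
  | [], _ => []
  | c :: cs, pm =>
    let m := if pm < c then c else pm
    m :: pvMaxima cs m

def pvFinal : List Char → Char → Char
  | [], pm => pm
  | c :: cs, pm => pvFinal cs (if pm < c then c else pm)

-- A's state sol is always (records so far).reverse ++ others so far.
theorem winner_inv (rest f b : List Char) (mx : Char)
    (hf : f ≠ []) (hl : f.getLast hf = mx) :
    rest.foldl (fun sol c => if sol.headD ' ' ≤ c then c :: sol else sol ++ [c])
      (f.reverse ++ b)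
    = (f ++ pvRecs rest mx).reverse ++ (b ++ pvOthers rest mx) := by
  induction rest generalizing f b mx with
  | nil => simp [pvRecs, pvOthers]
  | cons c cs ih =>
    have hhead : (f.reverse ++ b).headD ' ' = mx := by
      rcases List.eq_nil_or_concat f with rfl | ⟨ys, y, rfl⟩
      · exact absurd rfl hf
      · subst hl; simp
    simp only [List.foldl_cons, hhead, pvRecs, pvOthers]
    by_cases h : mx ≤ c
    · simp only [h, if_pos]
      have : c :: (f.reverse ++ b) = (f ++ [c]).reverse ++ b := by simp
      rw [this, ih (f ++ [c]) b c (by simp) (by simp)]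
      simp
    · simp only [h, if_neg, not_false_iff]
      have : (f.reverse ++ b) ++ [c] = f.reverse ++ (b ++ [c]) := by simp
      rw [this, ih f (b ++ [c]) mx hf hl]
      simp

-- B's maxima-building fold computes pvMaxima.
theorem maxima_fold (cs : List Char) (acc : List Char) (pm : Char) :
    cs.foldl (fun (st : List Char × Char) c =>
        let m := if st.2 < c then c else st.2
        (st.1 ++ [m], m)) (acc, pm)
    = (acc ++ pvMaxima cs pm, pvFinal cs pm) := by
  induction cs generalizing acc pm with
  | nil => simp [pvMaxima, pvFinal]
  | cons c cs ih => simp [pvMaxima, pvFinal, ih]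

theorem max_eq_of_le {pm c : Char} (h : pm ≤ c) : (if pm < c then c else pm) = c := by
  by_cases h' : pm < c
  · simp [h']
  · simp [le_antisymm h (not_lt.mp h')]

-- zipping the characters with their prefix maxima and filtering yields pvRecs/pvOthers.
theorem partition_recs (cs : List Char) (pm : Char) :
    ((cs.zip (pvMaxima cs pm)).filter (fun p => p.1 == p.2)).map Prod.fst
      = pvRecs cs pm := by
  induction cs generalizing pm with
  | nil => simp [pvMaxima, pvRecs]
  | cons c cs ih =>
    simp only [pvMaxima, pvRecs, List.zip_cons_cons, List.filter_cons]
    by_cases h : pm ≤ c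
    · rw [max_eq_of_le h]; simp [h, ih]
    · have hm : (if pm < c then c else pm) = pm := by
        have h' : ¬ pm < c := fun hlt => h hlt.le
        simp [h']
      have hne : (c == pm) = false := by
        exact beq_eq_false_iff_ne.mpr (fun he => h (le_of_eq he.symm))
      rw [hm]
      simp [hne, h, ih]

theorem partition_others (cs : List Char) (pm : Char) :
    ((cs.zip (pvMaxima cs pm)).filter (fun p => !(p.1 == p.2))).map Prod.fst
      = pvOthers cs pm := by
  induction cs generalizing pm with
  | nil => simp [pvMaxima, pvOthers]
  | cons c cs ih =>
    simp only [pvMaxima, pvOthers, List.zip_cons_cons, List.filter_cons]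
    by_cases h : pm ≤ c
    · rw [max_eq_of_le h]; simp [h, ih]
    · have hm : (if pm < c then c else pm) = pm := by
        have h' : ¬ pm < c := fun hlt => h hlt.le
        simp [h']
      have hne : (c == pm) = false := by
        exact beq_eq_false_iff_ne.mpr (fun he => h (le_of_eq he.symm))
      rw [hm]
      simp [hne, h, ih]

-- the record characters form a nondecreasing sequence, all ≥ the start maximum
theorem recs_chain (cs : List Char) (pm : Char) :
    (pvRecs cs pm).Pairwise (· ≤ ·) ∧ ∀ x ∈ pvRecs cs pm, pm ≤ x := by
  induction cs generalizing pm with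
  | nil => simp [pvRecs]
  | cons c cs ih =>
    by_cases h : pm ≤ c
    · obtain ⟨hp, hge⟩ := ih c
      refine ⟨?_, ?_⟩
      · simp only [pvRecs, h, if_pos, List.pairwise_cons]
        exact ⟨hge, hp⟩
      · intro x hx
        simp only [pvRecs, h, if_pos, List.mem_cons] at hx
        rcases hx with rfl | hx
        · exact h
        · exact le_trans h (hge x hx)
    · simpa [pvRecs, h] using ih pm

-- sorting a nondecreasing list of chars in reverse yields its reversal
theorem sorted_rev_of_chain (l : List Char) (h : l.Pairwise (· ≤ ·)) :
    PySem.List.sorted l (fun x => x) true = l.reverse := by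
  refine List.Perm.eq_of_pairwise (le := fun a b => b ≤ a)
    (fun a b _ _ h1 h2 => le_antisymm h2 h1)
    (PySem.List.sorted_pairwise_rev l (fun x => x))
    ((List.pairwise_reverse).mpr h)
    ((PySem.List.sorted_perm l (fun x => x) true).trans (l.reverse_perm).symm)

-- ===== VERDICT (by name: the statement is the Claim_ definition above) =====
theorem winner_spec : Claim_equal_winner := by
  intro txt _ hpre
  unfold Spec_winner winner winner_alt
  cases h : txt.toList with
  | nil =>
    exact absurd (by
      have h2 := congrArg String.ofList h
      rwa [String.ofList_toList] at h2) hpre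
  | cons t rest =>
    simp only [maxima_fold, List.nil_append, partition_recs, partition_others]
    rw [sorted_rev_of_chain _ (recs_chain (t :: rest) t).1]
    have hA := winner_inv rest [t] [] t (by simp) (by simp)
    simp only [List.reverse_cons, List.reverse_nil, List.nil_append, List.append_nil] at hA
    rw [hA]
    simp [pvRecs, pvOthers]
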